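-- pv_equiv track=rewrite | github.com/EcoFriendlyAppleSu/algo | leetcode/leetcode75/Problem724.py | solution
-- ===== SOURCE A (Python) =====
-- def solution(nums):
--     answer = -1
--     leftValue = 0
--     rightValue = 0
--
--     for i in range(len(nums)):
--         leftValue = sum(nums[:i])
--         rightValue = sum(nums[i+1:])
--         if leftValue == rightValue:
--             answer = i
--     return answer
-- ===== SOURCE B (Python) =====
-- def solution(nums):
--     # One pass with a running prefix sum instead of re-summing both slices per index (O(n) vs O(n^2)).
--     total = sum(nums)
--     answer = -1
--     left = 0
--     for i, x in enumerate(nums):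
--         if left == total - left - x:
--             answer = i
--         left += x
--     return answer
-- ===== Notes on version B (the rewrite author's own statement) =====
-- stated objective: faster
-- what changed: Replaces the per-index re-summation of both slices with a single pass that maintains a running prefix sum and compares it against total - left - x.
import Mathlib
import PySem

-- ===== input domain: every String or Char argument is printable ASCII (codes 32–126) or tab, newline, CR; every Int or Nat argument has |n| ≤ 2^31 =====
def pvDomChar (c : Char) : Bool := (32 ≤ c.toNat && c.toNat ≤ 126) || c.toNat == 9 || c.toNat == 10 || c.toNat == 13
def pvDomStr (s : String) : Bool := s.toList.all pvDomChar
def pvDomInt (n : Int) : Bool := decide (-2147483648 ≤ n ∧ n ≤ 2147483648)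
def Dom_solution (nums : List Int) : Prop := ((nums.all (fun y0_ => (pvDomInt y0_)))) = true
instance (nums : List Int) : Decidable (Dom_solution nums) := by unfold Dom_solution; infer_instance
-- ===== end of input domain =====

-- B replaces A's per-index re-summation of both slices with one pass keeping a running prefix sum (O(n) vs O(n^2)).

-- ===== PORT A =====
-- loop body of A: state is (answer, leftValue, rightValue)
def pvStepA (nums : List Int) (st : Int × Int × Int) (i : Int) : Int × Int × Int :=
  let leftValue := (PySem.List.slice nums none (some i)).sum
  let rightValue := (PySem.List.slice nums (some (i + 1)) none).sum
  if leftValue = rightValue then (i, leftValue, rightValue) else (st.1, leftValue, rightValue)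

def solution (nums : List Int) : Int :=
  ((PySem.List.pyRange 0 (nums.length : Int) 1).foldl (pvStepA nums) (-1, 0, 0)).1

-- ===== PORT B =====
-- loop body of B: state is (answer, left); p = (i, x) from enumerate
def pvStepB (total : Int) (st : Int × Int) (p : Int × Int) : Int × Int :=
  (if st.2 = total - st.2 - p.2 then p.1 else st.1, st.2 + p.2)

def solution_alt (nums : List Int) : Int :=
  ((PySem.List.enumerate nums 0).foldl (pvStepB nums.sum) (-1, 0)).1

-- ===== PRECONDITION & SPEC =====
def Spec_solution (nums : List Int) (out : Int) : Prop := out = solution_alt nums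
instance (nums : List Int) (out : Int) : Decidable (Spec_solution nums out) := by unfold Spec_solution; infer_instance

-- ===== CLAIM (what is proved, stated in full; the proofs are below) =====
def Claim_equal_solution : Prop := ∀ (nums : List Int), Dom_solution nums → Spec_solution nums (solution nums)

-- ===== LEMMAS AND PROOFS =====

lemma pv_key (nums : List Int) : ∀ (suf pre : List Int), pre ++ suf = nums →
    ∀ (ans l r : Int),
    ((PySem.List.pyRange (pre.length : Int) (nums.length : Int) 1).foldl (pvStepA nums) (ans, l, r)).1
      = ((PySem.List.enumerate suf (pre.length : Int)).foldl (pvStepB nums.sum) (ans, pre.sum)).1 := by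
  intro suf
  induction suf with
  | nil =>
    intro pre h ans l r
    subst h
    rw [PySem.List.pyRange_one_eq_nil (by simp)]
    rfl
  | cons x suf ih =>
    intro pre h ans l r
    have hlen : (pre.length : Int) < (nums.length : Int) := by
      subst h; simp
    rw [PySem.List.pyRange_one_cons hlen, PySem.List.enumerate_cons]
    simp only [List.foldl_cons]
    have hleft : (PySem.List.slice nums none (some (pre.length : Int))).sum = pre.sum := by
      rw [PySem.List.slice_to_natCast, ← h, List.take_left]
    have hright : (PySem.List.slice nums (some ((pre.length : Int) + 1)) none).sum = suf.sum := by
      have : ((pre.length : Int) + 1) = (((pre ++ [x]).length : Nat) : Int) := by simp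
      rw [this, PySem.List.slice_from_natCast, ← h,
        show pre ++ x :: suf = (pre ++ [x]) ++ suf by simp, List.drop_left]
    have htot : nums.sum = pre.sum + (x + suf.sum) := by subst h; simp
    have hcond : ((PySem.List.slice nums none (some (pre.length : Int))).sum
        = (PySem.List.slice nums (some ((pre.length : Int) + 1)) none).sum)
        ↔ (pre.sum = nums.sum - pre.sum - x) := by
      rw [hleft, hright]; omega
    have hstep : pvStepA nums (ans, l, r) (pre.length : Int)
        = (if pre.sum = nums.sum - pre.sum - x then (pre.length : Int) else ans, pre.sum, suf.sum) := by
      unfold pvStepA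
      simp only [hleft, hright]
      by_cases hc : pre.sum = nums.sum - pre.sum - x
      · rw [if_pos (hleft ▸ hright ▸ hcond.mpr hc), if_pos hc]
      · rw [if_neg (fun hh => hc ((hleft ▸ hright ▸ hcond).mp hh)), if_neg hc]
    rw [hstep]
    have := ih (pre ++ [x]) (by simp [h]) (if pre.sum = nums.sum - pre.sum - x then (pre.length : Int) else ans) pre.sum suf.sum
    simp only [List.length_append, List.length_singleton, List.sum_append, List.sum_cons,
      List.sum_nil, add_zero, Nat.cast_add, Nat.cast_one] at this
    rw [this]
    rfl

-- ===== VERDICT (by name: the statement is the Claim_ definition above) =====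
theorem solution_spec : Claim_equal_solution := by
  intro nums _
  unfold Spec_solution solution solution_alt
  have := pv_key nums nums [] rfl (-1) 0 0
  simpa using this
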